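-- pv_equiv track=rewrite | github.com/GuillaumeBriac/Puzzles | Meta/Level1/Meta_Puzzles_Lvl1.py | getMinProblemCount
-- ===== SOURCE A (Python) =====
-- from typing import List
-- from typing import List
--
-- def getMinProblemCount(N: int, S: List[int]) -> int:
--     """
--     Scoreboard Inference
--     """
--     S.sort()
--     pb = {1: 0, 2: 0} #nb of problems with score 1 and 2
--     for i in range(len(S)):
--         #Min 2 pts problems to get this score (maximize the number of twos)
--         min_two = S[i]//2
--
--         # add problem with score 2 if needed
--         if min_two - pb[2] > 0:
--             pb[2] += min_two - pb[2]
--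
--         # add problem with 1 score if needed
--         pt_needed = S[i] - (pb[1] + pb[2] * 2)
--         if pt_needed > 0:
--             pb[1] += pt_needed
--
--
--     return pb[1] + pb[2]
-- ===== SOURCE B (Python) =====
-- def getMinProblemCount(N, S):
--     if not S:
--         return 0
--     twos = max(max(S) // 2, 0)
--     ones = 1 if any(s > 0 and s % 2 == 1 for s in S) else 0
--     return twos + ones
-- ===== Notes on version B (the rewrite author's own statement) =====
-- stated objective: faster
-- what changed: Replaces A's sort followed by a dict-updating scan over the sorted scores with a single unsorted pass: the answer is max(max(S)//2, 0) two-point problems plus one one-point problem iff some score is positive and odd.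
import Mathlib
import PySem

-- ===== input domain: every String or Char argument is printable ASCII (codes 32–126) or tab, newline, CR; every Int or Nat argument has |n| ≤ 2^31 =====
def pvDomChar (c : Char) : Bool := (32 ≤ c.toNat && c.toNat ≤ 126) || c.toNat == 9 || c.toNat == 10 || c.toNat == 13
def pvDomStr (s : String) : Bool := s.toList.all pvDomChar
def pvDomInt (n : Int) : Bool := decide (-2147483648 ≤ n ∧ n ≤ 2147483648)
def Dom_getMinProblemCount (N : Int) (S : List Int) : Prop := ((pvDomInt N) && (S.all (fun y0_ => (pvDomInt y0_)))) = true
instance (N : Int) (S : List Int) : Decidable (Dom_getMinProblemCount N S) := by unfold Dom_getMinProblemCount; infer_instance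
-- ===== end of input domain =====

-- B replaces A's sort-then-scan dict loop by a single-pass closed form (max(S)//2 plus one if any
-- positive odd score); equivalence is about the RETURN value only (A sorts S in place, B does not).

-- ===== PORT A =====
def getMinProblemCount (N : Int) (S : List Int) : Int :=
  let S' := PySem.List.sorted S (fun x => x) false
  let pb : PySem.Dict Int Int := ((PySem.Dict.empty).insert 1 0).insert 2 0
  let pb := (PySem.List.pyRange 0 (PySem.List.len S') 1).foldl (fun pb i =>
    let si := PySem.List.pyGetD S' i 0
    let min_two := PySem.Int.floordiv si 2
    let pb := if min_two - pb.getD 2 0 > 0 then pb.insert 2 (pb.getD 2 0 + (min_two - pb.getD 2 0)) else pb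
    let pt_needed := si - (pb.getD 1 0 + pb.getD 2 0 * 2)
    if pt_needed > 0 then pb.insert 1 (pb.getD 1 0 + pt_needed) else pb) pb
  pb.getD 1 0 + pb.getD 2 0

-- ===== PORT B =====
def getMinProblemCount_alt (N : Int) (S : List Int) : Int :=
  match S with
  | [] => 0
  | x :: t =>
    let twos := max (PySem.Int.floordiv (t.foldl max x) 2) 0
    let ones : Int := if (x :: t).any (fun s => decide (0 < s) && decide (PySem.Int.mod s 2 = 1)) then 1 else 0
    twos + ones

-- ===== PRECONDITION & SPEC =====
def Spec_getMinProblemCount (N : Int) (S : List Int) (out : Int) : Prop := out = getMinProblemCount_alt N S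
instance (N : Int) (S : List Int) (out : Int) : Decidable (Spec_getMinProblemCount N S out) := by unfold Spec_getMinProblemCount; infer_instance

-- ===== CLAIM (what is proved, stated in full; the proofs are below) =====
def Claim_equal_getMinProblemCount : Prop := ∀ (N : Int) (S : List Int), Dom_getMinProblemCount N S → Spec_getMinProblemCount N S (getMinProblemCount N S)

-- ===== LEMMAS AND PROOFS =====

-- A's loop body on the dict, named for the proofs.
def pvStepA (d : PySem.Dict Int Int) (si : Int) : PySem.Dict Int Int :=
  let min_two := PySem.Int.floordiv si 2
  let d1 := if min_two - d.getD 2 0 > 0 then d.insert 2 (d.getD 2 0 + (min_two - d.getD 2 0)) else d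
  let pt := si - (d1.getD 1 0 + d1.getD 2 0 * 2)
  if pt > 0 then d1.insert 1 (d1.getD 1 0 + pt) else d1

-- A's per-element dict update, as a pair (pb[1], pb[2]) of values.
def pvStepP (p : Int × Int) (s : Int) : Int × Int :=
  let b := if PySem.Int.floordiv s 2 - p.2 > 0 then p.2 + (PySem.Int.floordiv s 2 - p.2) else p.2
  let a := if s - (p.1 + b * 2) > 0 then p.1 + (s - (p.1 + b * 2)) else p.1
  (a, b)

-- positive-odd indicator
def pvInd (s : Int) : Int := if 0 < s ∧ PySem.Int.mod s 2 = 1 then 1 else 0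

lemma pvStepA_pair (d : PySem.Dict Int Int) (s : Int) :
    ((pvStepA d s).getD 1 0, (pvStepA d s).getD 2 0) = pvStepP (d.getD 1 0, d.getD 2 0) s := by
  simp only [pvStepA, pvStepP]
  split_ifs with h1 h2 h3 <;> simp_all [PySem.Dict.getD_insert] <;> omega

lemma pvFold_dict (l : List Int) (d : PySem.Dict Int Int) :
    ((l.foldl pvStepA d).getD 1 0, (l.foldl pvStepA d).getD 2 0)
      = l.foldl pvStepP (d.getD 1 0, d.getD 2 0) := by
  induction l generalizing d with
  | nil => rfl
  | cons s t ih => simp only [List.foldl_cons, ih, ← pvStepA_pair]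

lemma pvFloordiv_max (m x : Int) :
    PySem.Int.floordiv (max m x) 2 = max (PySem.Int.floordiv m 2) (PySem.Int.floordiv x 2) := by
  rw [PySem.Int.floordiv_eq_ediv_of_pos (by omega), PySem.Int.floordiv_eq_ediv_of_pos (by omega),
    PySem.Int.floordiv_eq_ediv_of_pos (by omega)]
  omega

lemma pvStep_eq (a b s : Int) (ha : 0 ≤ a) (hb : 0 ≤ b)
    (hbs : 0 ≤ s → b ≤ PySem.Int.floordiv s 2) :
    pvStepP (a, b) s = (max a (pvInd s), max b (PySem.Int.floordiv s 2)) := by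
  have hd2 : PySem.Int.floordiv s 2 = s / 2 := PySem.Int.floordiv_eq_ediv_of_pos (by omega)
  have hm2 : PySem.Int.mod s 2 = s % 2 := PySem.Int.mod_eq_emod_of_pos (by omega)
  rw [hd2] at hbs
  simp only [pvStepP, pvInd, hd2, hm2, Prod.mk.injEq]
  split_ifs <;> constructor <;> omega

lemma pvPair_closed (l : List Int) (hl : l.Pairwise (· ≤ ·)) :
    ∀ a b : Int, 0 ≤ a → 0 ≤ b → (∀ x ∈ l, 0 ≤ x → b ≤ PySem.Int.floordiv x 2) →
    l.foldl pvStepP (a, b)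
      = (l.foldl (fun a s => max a (pvInd s)) a,
         l.foldl (fun b s => max b (PySem.Int.floordiv s 2)) b) := by
  induction l with
  | nil => intro a b _ _ _; rfl
  | cons s t ih =>
    intro a b ha hb hble
    have hst : ∀ x ∈ t, s ≤ x := (List.pairwise_cons.mp hl).1
    have hstep : pvStepP (a, b) s = (max a (pvInd s), max b (PySem.Int.floordiv s 2)) :=
      pvStep_eq a b s ha hb (fun hs => hble s (by simp) hs)
    simp only [List.foldl_cons, hstep]
    apply ih (List.pairwise_cons.mp hl).2
    · exact le_trans ha (le_max_left _ _)
    · exact le_trans hb (le_max_left _ _)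
    · intro x hx hx0
      have h1 : b ≤ PySem.Int.floordiv x 2 := hble x (by simp [hx]) hx0
      have h2 : PySem.Int.floordiv s 2 ≤ PySem.Int.floordiv x 2 := by
        rw [PySem.Int.floordiv_eq_ediv_of_pos (by omega),
          PySem.Int.floordiv_eq_ediv_of_pos (by omega)]
        exact Int.ediv_le_ediv (by omega) (hst x hx)
      omega

lemma pvOnes_closed (l : List Int) : ∀ a0 : Int, 0 ≤ a0 →
    l.foldl (fun a s => max a (pvInd s)) a0
      = max a0 (if l.any (fun s => decide (0 < s) && decide (PySem.Int.mod s 2 = 1)) then 1 else 0) := by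
  induction l with
  | nil =>
    intro a0 h
    simp only [List.foldl_nil, List.any_nil, Bool.false_eq_true, if_false]
    omega
  | cons x t ih =>
    intro a0 h
    simp only [List.foldl_cons, List.any_cons]
    rw [ih _ (le_trans h (le_max_left _ _))]
    by_cases hx : 0 < x ∧ PySem.Int.mod x 2 = 1
    · have hb : (decide (0 < x) && decide (PySem.Int.mod x 2 = 1)) = true := by
        rw [decide_eq_true hx.1, decide_eq_true hx.2]; rfl
      simp only [pvInd, if_pos hx, hb, Bool.true_or, if_true]
      split_ifs <;> omega
    · have hb : (decide (0 < x) && decide (PySem.Int.mod x 2 = 1)) = false := by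
        simp only [Bool.and_eq_false_iff, decide_eq_false_iff_not]; tauto
      have hm : max a0 (pvInd x) = a0 := by
        simp only [pvInd, if_neg hx]; omega
      simp only [hm, hb, Bool.false_or]

lemma pvTwos_closed (l : List Int) : ∀ b0 m0 : Int,
    l.foldl (fun b s => max b (PySem.Int.floordiv s 2)) (max b0 (PySem.Int.floordiv m0 2))
      = max b0 (PySem.Int.floordiv (l.foldl max m0) 2) := by
  induction l with
  | nil => intro b0 m0; rfl
  | cons x t ih =>
    intro b0 m0
    simp only [List.foldl_cons]
    rw [max_assoc, ← pvFloordiv_max, ih]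

-- ===== VERDICT (by name: the statement is the Claim_ definition above) =====
set_option maxHeartbeats 1000000 in
theorem getMinProblemCount_spec : Claim_equal_getMinProblemCount := by
  intro N S _
  unfold Spec_getMinProblemCount
  show (let S' := PySem.List.sorted S (fun x => x) false;
        let d0 : PySem.Dict Int Int := ((PySem.Dict.empty).insert 1 0).insert 2 0;
        let d := (PySem.List.pyRange 0 (PySem.List.len S') 1).foldl
          (fun pb i => pvStepA pb (PySem.List.pyGetD S' i 0)) d0;
        d.getD 1 0 + d.getD 2 0) = getMinProblemCount_alt N S
  set S' := PySem.List.sorted S (fun x => x) false with hS'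
  simp only []
  rw [PySem.List.foldl_pyRange_zero_pyGetD S' 0 pvStepA]
  have hfold := pvFold_dict S' (((PySem.Dict.empty : PySem.Dict Int Int).insert 1 0).insert 2 0)
  have hd0 : ((((PySem.Dict.empty : PySem.Dict Int Int).insert 1 0).insert 2 0).getD 1 0,
      (((PySem.Dict.empty : PySem.Dict Int Int).insert 1 0).insert 2 0).getD 2 0)
      = ((0 : Int), (0 : Int)) := by decide
  rw [hd0] at hfold
  have hpw : S'.Pairwise (· ≤ ·) := PySem.List.sorted_pairwise S (fun x => x)
  rw [pvPair_closed S' hpw 0 0 le_rfl le_rfl (by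
    intro x _ hx0
    rw [PySem.Int.floordiv_eq_ediv_of_pos (by omega)]
    omega)] at hfold
  have h1 := congrArg Prod.fst hfold
  have h2 := congrArg Prod.snd hfold
  simp only at h1 h2
  rw [h1, h2]
  have hperm : S'.Perm S := PySem.List.sorted_perm S (fun x => x) false
  haveI : RightCommutative (fun (b : Int) (s : Int) => max b (PySem.Int.floordiv s 2)) :=
    ⟨fun b x y => by rw [max_right_comm]⟩
  have htw : S'.foldl (fun b s => max b (PySem.Int.floordiv s 2)) 0
      = S.foldl (fun b s => max b (PySem.Int.floordiv s 2)) 0 := hperm.foldl_eq 0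
  have hany : S'.any (fun s => decide (0 < s) && decide (PySem.Int.mod s 2 = 1))
      = S.any (fun s => decide (0 < s) && decide (PySem.Int.mod s 2 = 1)) := hperm.any_eq
  rw [pvOnes_closed S' 0 le_rfl, hany, htw]
  cases S with
  | nil => rfl
  | cons x t =>
    show max 0 _ + t.foldl (fun b s => max b (PySem.Int.floordiv s 2)) (max 0 (PySem.Int.floordiv x 2)) = _
    rw [pvTwos_closed]
    simp only [getMinProblemCount_alt]
    have hx2 : PySem.Int.floordiv x 2 ≤ PySem.Int.floordiv (t.foldl max x) 2 := by
      rw [PySem.Int.floordiv_eq_ediv_of_pos (by omega),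
        PySem.Int.floordiv_eq_ediv_of_pos (by omega)]
      exact Int.ediv_le_ediv (by omega) (PySem.List.le_foldl_max t x).1
    split_ifs <;> omega
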